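-- pv_equiv track=rewrite | github.com/morgainep/llm4spi | llm4spi/coba.py | post_HE0
-- ===== SOURCE A (Python) =====
-- def post_HE0(r,z,a):
--    def exists_two_elements_with_sum_greater_than_a(z, a):
--       for i in range(len(z)):
--         for j in range(i + 1, len(z)):
--           if z[i] + z[j] > a:
--             return True
--       return False
--
--    return r == exists_two_elements_with_sum_greater_than_a(z, a)
-- ===== SOURCE B (Python) =====
-- def post_HE0(r, z, a):
--     s = sorted(z)
--     return r == (len(s) >= 2 and s[-1] + s[-2] > a)
-- ===== Notes on version B (the rewrite author's own statement) =====
-- stated objective: faster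
-- what changed: Replaces the nested O(n^2) pairwise scan with a single sort plus a check that the two largest elements sum above a (the maximal pair sum).
import Mathlib
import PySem

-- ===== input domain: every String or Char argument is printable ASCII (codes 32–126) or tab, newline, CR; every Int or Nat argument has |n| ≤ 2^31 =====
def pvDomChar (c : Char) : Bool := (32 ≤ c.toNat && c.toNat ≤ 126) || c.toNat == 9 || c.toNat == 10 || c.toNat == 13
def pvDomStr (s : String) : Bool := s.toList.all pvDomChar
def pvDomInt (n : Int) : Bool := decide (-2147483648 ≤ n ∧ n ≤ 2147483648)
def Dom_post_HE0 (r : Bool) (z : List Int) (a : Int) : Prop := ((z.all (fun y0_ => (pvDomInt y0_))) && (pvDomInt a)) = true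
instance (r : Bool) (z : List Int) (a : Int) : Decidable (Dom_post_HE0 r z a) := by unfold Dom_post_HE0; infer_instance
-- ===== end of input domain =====

-- B replaces A's nested pairwise scan with one sort plus a two-largest endpoint check.


-- ===== PORT A =====
-- helper: 'for i in range(len(z)): for j in range(i+1, len(z)): if z[i]+z[j] > a: return True / return False'
def existsTwoSumGt (z : List Int) (a : Int) : Bool :=
  (PySem.List.pyRange 0 z.length 1).any fun i =>
    (PySem.List.pyRange (i + 1) z.length 1).any fun j =>
      decide (PySem.List.pyGetD z i 0 + PySem.List.pyGetD z j 0 > a)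

def post_HE0 (r : Bool) (z : List Int) (a : Int) : Bool :=
  r == existsTwoSumGt z a

-- ===== PORT B =====
def post_HE0_alt (r : Bool) (z : List Int) (a : Int) : Bool :=
  let s := PySem.List.sorted z (fun x => x) false
  r == (decide (2 ≤ s.length) &&
        decide (PySem.List.pyGetD s (-1) 0 + PySem.List.pyGetD s (-2) 0 > a))

-- ===== PRECONDITION & SPEC =====
def Spec_post_HE0 (r : Bool) (z : List Int) (a : Int) (out : Bool) : Prop := out = post_HE0_alt r z a
instance (r : Bool) (z : List Int) (a : Int) (out : Bool) : Decidable (Spec_post_HE0 r z a out) := by unfold Spec_post_HE0; infer_instance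

-- ===== CLAIM (what is proved, stated in full; the proofs are below) =====
def Claim_equal_post_HE0 : Prop := ∀ (r : Bool) (z : List Int) (a : Int), Dom_post_HE0 r z a → Spec_post_HE0 r z a (post_HE0 r z a)

-- ===== LEMMAS AND PROOFS =====

-- existence of an index pair i < j whose elements sum above a
def PairGt (l : List Int) (a : Int) : Prop :=
  ∃ (i j : Nat) (hi : i < l.length) (hj : j < l.length), i < j ∧ l[i] + l[j] > a

lemma pairGt_cons (x : Int) (xs : List Int) (a : Int) :
    PairGt (x :: xs) a ↔ (∃ y ∈ xs, x + y > a) ∨ PairGt xs a := by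
  constructor
  · rintro ⟨i, j, hi, hj, hij, hsum⟩
    cases i with
    | zero =>
      obtain ⟨j', rfl⟩ : ∃ j', j = j' + 1 := ⟨j - 1, by omega⟩
      exact Or.inl ⟨xs[j']'(by simpa using hj), by simp, by simpa using hsum⟩
    | succ i' =>
      obtain ⟨j', rfl⟩ : ∃ j', j = j' + 1 := ⟨j - 1, by omega⟩
      exact Or.inr ⟨i', j', by simpa using hi, by simpa using hj, by omega, by simpa using hsum⟩
  · rintro (⟨y, hy, hsum⟩ | ⟨i, j, hi, hj, hij, hsum⟩)
    · obtain ⟨j', hj', rfl⟩ := List.mem_iff_getElem.mp hy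
      exact ⟨0, j' + 1, by simp, by simpa using hj', by omega, by simpa using hsum⟩
    · exact ⟨i + 1, j + 1, by simpa using hi, by simpa using hj, by omega, by simpa using hsum⟩

lemma pairGt_perm {l l' : List Int} (p : l.Perm l') (a : Int) :
    PairGt l a ↔ PairGt l' a := by
  induction p with
  | nil => rfl
  | cons x p ih =>
    rw [pairGt_cons, pairGt_cons, ih]
    constructor <;> rintro (⟨y, hy, h⟩ | h)
    · exact Or.inl ⟨y, p.mem_iff.mp hy, h⟩
    · exact Or.inr h
    · exact Or.inl ⟨y, p.mem_iff.mpr hy, h⟩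
    · exact Or.inr h
  | swap u v l =>
    rw [pairGt_cons, pairGt_cons, pairGt_cons, pairGt_cons]
    constructor
    · rintro (⟨w, hw, h⟩ | h)
      · rcases List.mem_cons.mp hw with rfl | hw
        · exact Or.inl ⟨v, List.mem_cons_self, by omega⟩
        · exact Or.inr (Or.inl ⟨w, hw, h⟩)
      · rcases h with ⟨w, hw, h⟩ | h
        · exact Or.inl ⟨w, List.mem_cons_of_mem _ hw, by omega⟩
        · exact Or.inr (Or.inr h)
    · rintro (⟨w, hw, h⟩ | h)
      · rcases List.mem_cons.mp hw with rfl | hw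
        · exact Or.inl ⟨u, List.mem_cons_self, by omega⟩
        · exact Or.inr (Or.inl ⟨w, hw, h⟩)
      · rcases h with ⟨w, hw, h⟩ | h
        · exact Or.inl ⟨w, List.mem_cons_of_mem _ hw, by omega⟩
        · exact Or.inr (Or.inr h)
  | trans _ _ ih1 ih2 => rw [ih1, ih2]

lemma pairGt_sorted (s : List Int) (a : Int) (hs : s.Pairwise (· ≤ ·)) (h2 : 2 ≤ s.length) :
    PairGt s a ↔ s[s.length - 1]'(by omega) + s[s.length - 2]'(by omega) > a := by
  have hmono := List.pairwise_iff_getElem.mp hs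
  constructor
  · rintro ⟨i, j, hi, hj, hij, hsum⟩
    have h1 : s[i] ≤ s[s.length - 2]'(by omega) := by
      rcases Nat.lt_or_ge i (s.length - 2) with hlt | hge
      · exact hmono i (s.length - 2) hi (by omega) hlt
      · have : i = s.length - 2 := by omega
        subst this; exact le_refl _
    have h2' : s[j] ≤ s[s.length - 1]'(by omega) := by
      rcases Nat.lt_or_ge j (s.length - 1) with hlt | hge
      · exact hmono j (s.length - 1) hj (by omega) hlt
      · have : j = s.length - 1 := by omega
        subst this; exact le_refl _
    omega
  · intro hsum
    exact ⟨s.length - 2, s.length - 1, by omega, by omega, by omega, by omega⟩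

lemma pairGt_short (s : List Int) (a : Int) (h : s.length < 2) : ¬ PairGt s a := by
  rintro ⟨i, j, hi, hj, hij, _⟩; omega

-- A's nested loop decides PairGt
lemma existsTwoSumGt_iff (z : List Int) (a : Int) :
    existsTwoSumGt z a = true ↔ PairGt z a := by
  unfold existsTwoSumGt PairGt
  simp only [List.any_eq_true, PySem.List.mem_pyRange_one, decide_eq_true_eq]
  constructor
  · rintro ⟨i, ⟨hi0, hilen⟩, j, ⟨hij, hjlen⟩, hsum⟩
    refine ⟨i.toNat, j.toNat, by omega, by omega, by omega, ?_⟩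
    rwa [PySem.List.pyGetD_eq_getElem z (i := i) 0 hi0 hilen,
         PySem.List.pyGetD_eq_getElem z (i := j) 0 (by omega) hjlen] at hsum
  · rintro ⟨i, j, hi, hj, hij, hsum⟩
    have hi0 : (0 : Int) ≤ (i : Int) := by omega
    have hilen : (i : Int) < (z.length : Int) := by omega
    have hj0 : (i : Int) + 1 ≤ (j : Int) := by omega
    have hjlen : (j : Int) < (z.length : Int) := by omega
    have hsum' : PySem.List.pyGetD z (i : Int) 0 + PySem.List.pyGetD z (j : Int) 0 > a := by
      rw [PySem.List.pyGetD_eq_getElem z (i := (i : Int)) 0 hi0 hilen,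
          PySem.List.pyGetD_eq_getElem z (i := (j : Int)) 0 (by omega) hjlen]
      simpa using hsum
    exact ⟨(i : Int), ⟨hi0, hilen⟩, (j : Int), ⟨hj0, hjlen⟩, hsum'⟩

-- the two boolean bodies agree
lemma bodies_eq (z : List Int) (a : Int) :
    existsTwoSumGt z a =
      (decide (2 ≤ (PySem.List.sorted z (fun x => x) false).length) &&
       decide (PySem.List.pyGetD (PySem.List.sorted z (fun x => x) false) (-1) 0 +
               PySem.List.pyGetD (PySem.List.sorted z (fun x => x) false) (-2) 0 > a)) := by
  set s := PySem.List.sorted z (fun x => x) false with hsdef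
  have hperm : s.Perm z := PySem.List.sorted_perm z (fun x => x) false
  have hpw : s.Pairwise (· ≤ ·) := PySem.List.sorted_pairwise z (fun x => x)
  rcases Nat.lt_or_ge s.length 2 with hlen | hlen
  · have hA : existsTwoSumGt z a = false := by
      rw [Bool.eq_false_iff]
      intro h
      exact pairGt_short s a hlen
        ((pairGt_perm hperm a).mpr ((existsTwoSumGt_iff z a).mp h))
    rw [hA]
    have : ¬ (2 ≤ s.length) := by omega
    simp [this]
  · have hg1 : PySem.List.pyGetD s (-1) 0 = s[s.length - 1]'(by omega) :=
      PySem.List.pyGetD_neg_ofNat s 1 0 (by omega) (by omega)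
    have hg2 : PySem.List.pyGetD s (-2) 0 = s[s.length - 2]'(by omega) :=
      PySem.List.pyGetD_neg_ofNat s 2 0 (by omega) (by omega)
    have hiff : existsTwoSumGt z a = true ↔
        ((decide (2 ≤ s.length) &&
          decide (PySem.List.pyGetD s (-1) 0 + PySem.List.pyGetD s (-2) 0 > a)) = true) := by
      rw [existsTwoSumGt_iff, ← pairGt_perm hperm a, pairGt_sorted s a hpw hlen, hg1, hg2]
      simp [hlen]
    rcases hc : existsTwoSumGt z a with _ | _
    · symm
      rw [Bool.eq_false_iff]
      intro h
      rw [← hiff] at h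
      simp [hc] at h
    · exact (hiff.mp hc).symm

-- ===== VERDICT (by name: the statement is the Claim_ definition above) =====
theorem post_HE0_spec : Claim_equal_post_HE0 := by
  intro r z a _
  unfold Spec_post_HE0 post_HE0 post_HE0_alt
  rw [bodies_eq]
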